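-- pv_equiv track=rewrite | github.com/binhtran23/Filanner | backend/app/utils/gamification.py | get_asset_description
-- ===== SOURCE A (Python) =====
-- def get_asset_description(day: int) -> str:
--     """Get description for the 3D asset."""
--     descriptions = {
--         1: "Cây mầm xanh - Bắt đầu hành trình",
--         5: "Cây non phát triển",
--         10: "Cây đã có nhiều lá",
--         15: "Cây lớn có hoa",
--         20: "Cây trổ bông",
--         30: "Cây trái chín - Hoàn thành 1 tháng!",
--     }
--
--     # Get closest milestone
--     for milestone in sorted(descriptions.keys(), reverse=True):
--         if day >= milestone:
--             return descriptions[milestone]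
--
--     return "Tiếp tục phát triển cây của bạn!"
-- ===== SOURCE B (Python) =====
-- THRESHOLDS = [1, 5, 10, 15, 20, 30]
-- DESCRIPTIONS = [
--     "Cây mầm xanh - Bắt đầu hành trình",
--     "Cây non phát triển",
--     "Cây đã có nhiều lá",
--     "Cây lớn có hoa",
--     "Cây trổ bông",
--     "Cây trái chín - Hoàn thành 1 tháng!",
-- ]
--
--
-- def get_asset_description(day: int) -> str:
--     """Get description for the 3D asset."""
--     # binary search: lo ends as bisect_right(THRESHOLDS, day)
--     lo, hi = 0, len(THRESHOLDS)
--     while lo < hi: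
--         mid = (lo + hi) // 2
--         if THRESHOLDS[mid] <= day:
--             lo = mid + 1
--         else:
--             hi = mid
--     if lo == 0:
--         return "Tiếp tục phát triển cây của bạn!"
--     return DESCRIPTIONS[lo - 1]
-- ===== Notes on version B (the rewrite author's own statement) =====
-- stated objective: alternative
-- what changed: Replaced the dict plus reverse-sorted linear scan with two parallel ascending arrays and a hand-rolled bisect_right binary search over the thresholds.
import Mathlib
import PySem

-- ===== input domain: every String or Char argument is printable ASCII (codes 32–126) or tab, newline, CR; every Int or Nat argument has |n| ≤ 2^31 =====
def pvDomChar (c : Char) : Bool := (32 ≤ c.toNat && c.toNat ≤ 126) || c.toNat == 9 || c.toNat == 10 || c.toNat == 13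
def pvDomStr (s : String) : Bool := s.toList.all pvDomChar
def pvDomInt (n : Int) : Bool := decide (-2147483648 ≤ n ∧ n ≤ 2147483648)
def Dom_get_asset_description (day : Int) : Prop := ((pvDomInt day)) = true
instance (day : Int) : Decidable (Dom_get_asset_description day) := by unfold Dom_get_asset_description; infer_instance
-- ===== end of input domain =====

-- B replaces A's dict + reverse-sorted linear scan by a binary search over an ascending
-- threshold array (alternative structure; return values are identical on all inputs).

-- ===== PORT A =====
def pvDescA : PySem.Dict Int String := PySem.Dict.ofList
  [(1, "Cây mầm xanh - Bắt đầu hành trình"),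
   (5, "Cây non phát triển"),
   (10, "Cây đã có nhiều lá"),
   (15, "Cây lớn có hoa"),
   (20, "Cây trổ bông"),
   (30, "Cây trái chín - Hoàn thành 1 tháng!")]

-- the for-loop over sorted(keys, reverse=True): first milestone with day >= milestone
def pvLoopA (day : Int) : List Int → String
  | [] => "Tiếp tục phát triển cây của bạn!"
  | m :: rest => if m ≤ day then pvDescA.getD m "" else pvLoopA day rest

def get_asset_description (day : Int) : String :=
  pvLoopA day (PySem.List.sorted pvDescA.keys (fun x => x) true)

-- ===== PORT B =====
def pvThresholds : List Int := [1, 5, 10, 15, 20, 30]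
def pvDescriptions : List String :=
  ["Cây mầm xanh - Bắt đầu hành trình",
   "Cây non phát triển",
   "Cây đã có nhiều lá",
   "Cây lớn có hoa",
   "Cây trổ bông",
   "Cây trái chín - Hoàn thành 1 tháng!"]

-- the while-loop of Source B: hand-rolled bisect_right over pvThresholds
def pvBisect (day : Int) (lo hi : Nat) : Nat :=
  if h : lo < hi then
    let mid := (lo + hi) / 2
    if pvThresholds.getD mid 0 ≤ day then pvBisect day (mid + 1) hi
    else pvBisect day lo mid
  else lo
termination_by hi - lo
decreasing_by all_goals omega

def get_asset_description_alt (day : Int) : String :=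
  let lo := pvBisect day 0 pvThresholds.length
  if lo = 0 then "Tiếp tục phát triển cây của bạn!"
  else pvDescriptions.getD (lo - 1) ""

-- ===== PRECONDITION & SPEC =====
def Spec_get_asset_description (day : Int) (out : String) : Prop := out = get_asset_description_alt day
instance (day : Int) (out : String) : Decidable (Spec_get_asset_description day out) := by unfold Spec_get_asset_description; infer_instance

-- ===== CLAIM (what is proved, stated in full; the proofs are below) =====
def Claim_equal_get_asset_description : Prop := ∀ (day : Int), Dom_get_asset_description day → Spec_get_asset_description day (get_asset_description day)

-- ===== LEMMAS AND PROOFS =====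

-- ===== VERDICT (by name: the statement is the Claim_ definition above) =====
theorem get_asset_description_spec : Claim_equal_get_asset_description := by
  intro day _
  unfold Spec_get_asset_description get_asset_description get_asset_description_alt
  rw [show PySem.List.sorted pvDescA.keys (fun x => x) true = [30, 20, 15, 10, 5, 1] from by decide]
  rcases lt_or_ge day 1 with h0 | h0
  · simp [pvLoopA, pvBisect.eq_def, pvThresholds, pvDescriptions, pvDescA,
      show ¬(1:Int) ≤ day by omega, show ¬(5:Int) ≤ day by omega, show ¬(10:Int) ≤ day by omega, show ¬(15:Int) ≤ day by omega, show ¬(20:Int) ≤ day by omega, show ¬(30:Int) ≤ day by omega]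
    try decide
  rcases lt_or_ge day 5 with h1 | h1
  · simp [pvLoopA, pvBisect.eq_def, pvThresholds, pvDescriptions, pvDescA,
      show (1:Int) ≤ day by omega, show ¬(5:Int) ≤ day by omega, show ¬(10:Int) ≤ day by omega, show ¬(15:Int) ≤ day by omega, show ¬(20:Int) ≤ day by omega, show ¬(30:Int) ≤ day by omega]
    try decide
  rcases lt_or_ge day 10 with h2 | h2
  · simp [pvLoopA, pvBisect.eq_def, pvThresholds, pvDescriptions, pvDescA,
      show (1:Int) ≤ day by omega, show (5:Int) ≤ day by omega, show ¬(10:Int) ≤ day by omega, show ¬(15:Int) ≤ day by omega, show ¬(20:Int) ≤ day by omega, show ¬(30:Int) ≤ day by omega]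
    try decide
  rcases lt_or_ge day 15 with h3 | h3
  · simp [pvLoopA, pvBisect.eq_def, pvThresholds, pvDescriptions, pvDescA,
      show (1:Int) ≤ day by omega, show (5:Int) ≤ day by omega, show (10:Int) ≤ day by omega, show ¬(15:Int) ≤ day by omega, show ¬(20:Int) ≤ day by omega, show ¬(30:Int) ≤ day by omega]
    try decide
  rcases lt_or_ge day 20 with h4 | h4
  · simp [pvLoopA, pvBisect.eq_def, pvThresholds, pvDescriptions, pvDescA,
      show (1:Int) ≤ day by omega, show (5:Int) ≤ day by omega, show (10:Int) ≤ day by omega, show (15:Int) ≤ day by omega, show ¬(20:Int) ≤ day by omega, show ¬(30:Int) ≤ day by omega]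
    try decide
  rcases lt_or_ge day 30 with h5 | h5
  · simp [pvLoopA, pvBisect.eq_def, pvThresholds, pvDescriptions, pvDescA,
      show (1:Int) ≤ day by omega, show (5:Int) ≤ day by omega, show (10:Int) ≤ day by omega, show (15:Int) ≤ day by omega, show (20:Int) ≤ day by omega, show ¬(30:Int) ≤ day by omega]
    try decide
  simp [pvLoopA, pvBisect.eq_def, pvThresholds, pvDescriptions, pvDescA,
      show (1:Int) ≤ day by omega, show (5:Int) ≤ day by omega, show (10:Int) ≤ day by omega, show (15:Int) ≤ day by omega, show (20:Int) ≤ day by omega, show (30:Int) ≤ day by omega]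
  try decide
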